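-- pv_equiv track=rewrite | github.com/Dealizey/subtitle_translate_with_LLM | translate.py | make_cover_feed_list
-- ===== SOURCE A (Python) =====
-- def make_cover_feed_list(subs: list, items_per_time: int, cover: int):
--     feed = []
--     current = []
--     index = 0
--     while index < len(subs):
--         if len(current) < items_per_time:
--             current.append(subs[index])
--             index += 1
--         else:
--             feed.append(current)
--             current = []
--             index -= cover
--     if len(current) > 0:
--         feed.append(current)
--
--     result_dict = []
--     for each in feed:  # 每个each包含items_per_time个字幕
--         tmp_d = {}
--         for c in each:
--             tmp_d[c.split("\n")[0]] = "\n".join(c.split("\n")[2:])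
--         result_dict.append(tmp_d)
--
--     return result_dict
-- ===== SOURCE B (Python) =====
-- def make_cover_feed_list(subs: list, items_per_time: int, cover: int):
--     step = items_per_time - cover
--     windows = []
--     start = 0
--     while start < len(subs):
--         windows.append(subs[start:start + items_per_time])
--         if start + items_per_time < len(subs):
--             start += step
--         else:
--             break
--     result = []
--     for w in windows:
--         d = {}
--         for line in w:
--             parts = line.split("\n")
--             d[parts[0]] = "\n".join(parts[2:])
--         result.append(d)
--     return result
-- ===== Notes on version B (the rewrite author's own statement) =====
-- stated objective: simpler
-- what changed: Replaces A's one-item-at-a-time append loop with index-rewind (index -= cover) by computing step = items_per_time - cover once and slicing each overlapping window directly in a single forward-only while loop, splitting each subtitle line once.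
-- outside the precondition, e.g. on make_cover_feed_list(['k\nt\nv', 'k2\nt\nv2'], -1, -3): A returns [{}], B returns [{'k': 'v'}]
import Mathlib
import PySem

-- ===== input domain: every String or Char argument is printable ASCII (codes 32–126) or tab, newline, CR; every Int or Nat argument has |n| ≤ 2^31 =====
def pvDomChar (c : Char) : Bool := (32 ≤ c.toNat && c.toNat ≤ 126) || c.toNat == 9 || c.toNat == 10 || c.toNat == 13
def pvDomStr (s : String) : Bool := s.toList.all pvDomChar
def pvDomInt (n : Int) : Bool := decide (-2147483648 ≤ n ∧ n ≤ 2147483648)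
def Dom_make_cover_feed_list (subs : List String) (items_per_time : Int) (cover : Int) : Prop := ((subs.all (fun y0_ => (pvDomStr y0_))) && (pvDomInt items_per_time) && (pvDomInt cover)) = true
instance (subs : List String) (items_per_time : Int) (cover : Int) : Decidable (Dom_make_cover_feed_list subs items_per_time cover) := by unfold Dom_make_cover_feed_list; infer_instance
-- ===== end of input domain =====

-- B replaces A's append-one-item-with-index-rewind window builder by a single forward
-- while loop slicing each overlapping window directly (objective: simpler).

-- ===== PORT A =====
-- the while loop of A: state (feed, current, index); fuel bounds the iterations
-- (inside Pre_ the loop terminates within the given fuel; the fuel-out branch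
-- performs the same final partial-window append and is never reached under Pre_)
def pvALoop (subs : List String) (ipt cover : Int) :
    Nat → List (List String) → List String → Int → List (List String)
  | 0, feed, current, _ => if current.length > 0 then feed ++ [current] else feed
  | n + 1, feed, current, index =>
    if index < (subs.length : Int) then
      if (current.length : Int) < ipt then
        match PySem.List.pyGet? subs index with
        | some s => pvALoop subs ipt cover n feed (current ++ [s]) (index + 1)
        | none => feed  -- IndexError; unreachable under Pre_
      else pvALoop subs ipt cover n (feed ++ [current]) [] (index - cover)
    else if current.length > 0 then feed ++ [current] else feed

-- the second loop of A: tmp_d[c.split("\n")[0]] = "\n".join(c.split("\n")[2:])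
def pvADict (each : List String) : List (String × String) :=
  (each.foldl (fun (d : PySem.Dict String String) c =>
      d.insert (((PySem.Str.split? c "\n").getD []).headD "")
        (PySem.Str.join "\n" (PySem.List.slice ((PySem.Str.split? c "\n").getD []) (some 2) none)))
    PySem.Dict.empty).items

def make_cover_feed_list (subs : List String) (items_per_time : Int) (cover : Int) : List (List (String × String)) :=
  (pvALoop subs items_per_time cover ((items_per_time.toNat + 1) * (subs.length + 1) + 1) [] [] 0).map pvADict

-- ===== PORT B =====
-- B's forward while loop: slice subs[start:start+ipt], advance by step, break when
-- start+ipt reaches the end (fuel bounds iterations; enough under Pre_)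
def pvBLoop (subs : List String) (ipt step : Int) :
    Nat → Int → List (List String) → List (List String)
  | 0, _, acc => acc
  | n + 1, start, acc =>
    if start < (subs.length : Int) then
      let w := PySem.List.slice subs (some start) (some (start + ipt))
      if start + ipt < (subs.length : Int) then
        pvBLoop subs ipt step n (start + step) (acc ++ [w])
      else acc ++ [w]
    else acc

-- B's dict conversion: split each line once
def pvBDict (w : List String) : List (String × String) :=
  (w.foldl (fun (d : PySem.Dict String String) line =>
      let parts := (PySem.Str.split? line "\n").getD []
      d.insert (parts.headD "")
        (PySem.Str.join "\n" (PySem.List.slice parts (some 2) none)))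
    PySem.Dict.empty).items

def make_cover_feed_list_alt (subs : List String) (items_per_time : Int) (cover : Int) : List (List (String × String)) :=
  (pvBLoop subs items_per_time (items_per_time - cover) (subs.length + 1) 0 []).map pvBDict

-- ===== PRECONDITION & SPEC =====
-- Pre_ excludes exactly the inputs where A's while loop never terminates
-- (items_per_time ≤ 0 with nonempty subs, or cover ≥ items_per_time with more than
-- items_per_time subtitles) except the one returning corner items_per_time ≤ 0 ∧
-- cover < 0 ∧ subs ≠ [], where A returns a list of empty dicts built from empty
-- windows — an artefact of skipping by -cover — which B does not reproduce (see cites).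
def Pre_make_cover_feed_list (subs : List String) (items_per_time : Int) (cover : Int) : Prop :=
  subs = [] ∨ (1 ≤ items_per_time ∧ (cover < items_per_time ∨ (subs.length : Int) ≤ items_per_time))
instance (subs : List String) (items_per_time : Int) (cover : Int) : Decidable (Pre_make_cover_feed_list subs items_per_time cover) := by unfold Pre_make_cover_feed_list; infer_instance

def pvWitness_make_cover_feed_list : List String × Int × Int :=
  (["1\ntime\nhello", "2\ntime\nworld", "3\ntime\nbye"], 2, 1)

def Spec_make_cover_feed_list (subs : List String) (items_per_time : Int) (cover : Int) (out : List (List (String × String))) : Prop := out = make_cover_feed_list_alt subs items_per_time cover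
instance (subs : List String) (items_per_time : Int) (cover : Int) (out : List (List (String × String))) : Decidable (Spec_make_cover_feed_list subs items_per_time cover out) := by unfold Spec_make_cover_feed_list; infer_instance

-- ===== CLAIM (what is proved, stated in full; the proofs are below) =====
def Claim_equal_make_cover_feed_list : Prop := ∀ (subs : List String) (items_per_time : Int) (cover : Int), Dom_make_cover_feed_list subs items_per_time cover → Pre_make_cover_feed_list subs items_per_time cover → Spec_make_cover_feed_list subs items_per_time cover (make_cover_feed_list subs items_per_time cover)

-- ===== LEMMAS AND PROOFS =====

lemma pvSliceNil (xs : List String) (a : Int) (h : 0 ≤ a) :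
    PySem.List.slice xs (some a) (some a) = [] := by
  rw [PySem.List.slice_toNat xs h h]; simp
lemma pvSliceSnoc (xs : List String) (a i : Int) (h0 : 0 ≤ a) (hai : a ≤ i)
    (hn : i.toNat < xs.length) :
    PySem.List.slice xs (some a) (some i) ++ [xs[i.toNat]] =
      PySem.List.slice xs (some a) (some (i + 1)) := by
  rw [PySem.List.slice_toNat xs h0 (by omega), PySem.List.slice_toNat xs h0 (by omega)]
  have h1 : (i + 1).toNat - a.toNat = (i.toNat - a.toNat) + 1 := by omega
  rw [h1, List.take_add_one]
  congr 1
  rw [List.getElem?_drop]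
  have h2 : a.toNat + (i.toNat - a.toNat) = i.toNat := by omega
  rw [h2, List.getElem?_eq_getElem hn]
  rfl
lemma pvSliceClamp (xs : List String) (a b : Int) (h0 : 0 ≤ a) (hb : (xs.length : Int) ≤ b) :
    PySem.List.slice xs (some a) (some b) = xs.drop a.toNat := by
  rw [PySem.List.slice_toNat xs h0 (by omega)]
  exact List.take_of_length_le (by simp; omega)
lemma pvBLoop_acc (subs : List String) (ipt step : Int) :
    ∀ (n : Nat) (start : Int) (acc : List (List String)),
      pvBLoop subs ipt step n start acc = acc ++ pvBLoop subs ipt step n start [] := by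
  intro n
  induction n with
  | zero => intro start acc; simp [pvBLoop]
  | succ n ih =>
    intro start acc
    simp only [pvBLoop]
    split_ifs with h1 h2
    · rw [ih _ (acc ++ _), ih _ ([] ++ _)]; simp
    · simp
    · simp
lemma pvBLoop_fuel (subs : List String) (ipt step : Int) (hstep : 1 ≤ step) :
    ∀ (n m : Nat) (start : Int),
      ((subs.length : Int) - start).toNat < n → ((subs.length : Int) - start).toNat < m →
      pvBLoop subs ipt step n start [] = pvBLoop subs ipt step m start [] := by
  intro n
  induction n with
  | zero => intro m start h; omega
  | succ n ih =>
    intro m start hn hm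
    obtain ⟨m', rfl⟩ : ∃ m', m = m' + 1 := ⟨m - 1, by omega⟩
    simp only [pvBLoop]
    split_ifs with h1 h2
    · rw [pvBLoop_acc _ _ _ n, pvBLoop_acc _ _ _ m']
      rw [ih m' (start + step) (by omega) (by omega)]
    · rfl
    · rfl

lemma pvBLoop_succ (subs : List String) (ipt step : Int) (n : Nat) (start : Int) (acc : List (List String)) :
    pvBLoop subs ipt step (n + 1) start acc =
      if start < (subs.length : Int) then
        (if start + ipt < (subs.length : Int) then
          pvBLoop subs ipt step n (start + step) (acc ++ [PySem.List.slice subs (some start) (some (start + ipt))])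
        else acc ++ [PySem.List.slice subs (some start) (some (start + ipt))])
      else acc := by
  simp only [pvBLoop]

lemma pvMain (subs : List String) (ipt cover : Int)
    (hipt : 1 ≤ ipt) (hstep : 1 ≤ ipt - cover) :
    ∀ (n : Nat) (feed : List (List String)) (current : List String) (index : Int),
      0 ≤ index - (current.length : Int) →
      (current.length : Int) ≤ ipt →
      (current ≠ [] → index ≤ (subs.length : Int)) →
      current = PySem.List.slice subs (some (index - (current.length : Int))) (some index) →
      (ipt.toNat + 1) * (((subs.length : Int) - (index - (current.length : Int))).toNat) - current.length < n →
      pvALoop subs ipt cover n feed current index =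
        feed ++ pvBLoop subs ipt (ipt - cover) (subs.length + 1) (index - (current.length : Int)) [] := by
  intro n
  induction n with
  | zero =>
    intro feed current index hws0 hcl hne hrep hF
    omega
  | succ n ih =>
    intro feed current index hws0 hcl hne hrep hF
    simp only [pvALoop]
    by_cases hlt : index < (subs.length : Int)
    · rw [if_pos hlt]
      by_cases hpos : (current.length : Int) < ipt
      · -- append branch
        rw [if_pos hpos]
        rw [PySem.List.pyGet?_eq_some_getElem subs (by omega) hlt]
        simp only []
        show pvALoop subs ipt cover n feed (current ++ [subs[index.toNat]]) (index + 1) = _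
        have hws : index + 1 - ((current ++ [subs[index.toNat]]).length : Int)
            = index - (current.length : Int) := by simp; try ring
        rw [ih feed (current ++ [subs[index.toNat]]) (index + 1)
            (by rw [hws]; omega)
            (by simp only [List.length_append, List.length_cons, List.length_nil]; push_cast; omega)
            (fun _ => by omega)
            (by rw [hws, ← pvSliceSnoc subs _ index hws0 (by omega) (by omega), ← hrep])
            (by rw [hws]
                have hA : 1 ≤ ((subs.length : Int) - (index - (current.length : Int))).toNat := by omega
                have hP : ipt.toNat + 1 ≤ (ipt.toNat + 1) *
                    ((subs.length : Int) - (index - (current.length : Int))).toNat :=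
                  Nat.le_mul_of_pos_right _ (by omega)
                have hlen : (current ++ [subs[index.toNat]]).length = current.length + 1 := by simp
                rw [hlen]
                omega)]
        rw [hws]
      · -- rewind branch
        rw [if_neg hpos]
        have hceq : (current.length : Int) = ipt := by omega
        have hcn : current.length = ipt.toNat := by omega
        have hws : index - cover - (([] : List String).length : Int)
            = (index - (current.length : Int)) + (ipt - cover) := by simp; omega
        rw [ih (feed ++ [current]) [] (index - cover)
            (by simp only [List.length_nil, Nat.cast_zero, sub_zero]; omega)
            (by simp only [List.length_nil, Nat.cast_zero]; omega)
            (fun h => absurd rfl h)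
            (by rw [hws,
                  show (index - (current.length : Int)) + (ipt - cover) = index - cover from by omega]
                exact (pvSliceNil subs _ (by omega)).symm)
            (by simp only [List.length_nil, Nat.cast_zero, sub_zero]
                have e0 : ipt.toNat + 1 ≤ ((subs.length : Int) - (index - (current.length : Int))).toNat := by omega
                have e1 : ((subs.length : Int) - (index - cover)).toNat
                    ≤ ((subs.length : Int) - (index - (current.length : Int))).toNat - 1 := by omega
                have e2 : (ipt.toNat + 1) * ((subs.length : Int) - (index - cover)).toNat
                    ≤ (ipt.toNat + 1) * (((subs.length : Int) - (index - (current.length : Int))).toNat - 1) :=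
                  Nat.mul_le_mul_left _ e1
                have e3 : (ipt.toNat + 1) * (((subs.length : Int) - (index - (current.length : Int))).toNat - 1)
                    + (ipt.toNat + 1) * 1
                    = (ipt.toNat + 1) * ((subs.length : Int) - (index - (current.length : Int))).toNat := by
                  rw [← Nat.mul_add]; congr 1; omega
                omega)]
        rw [hws]
        have hStep : pvBLoop subs ipt (ipt - cover) (subs.length + 1) (index - (current.length : Int)) []
            = [current] ++ pvBLoop subs ipt (ipt - cover) (subs.length + 1)
                ((index - (current.length : Int)) + (ipt - cover)) [] := by
          have h1 : index - (current.length : Int) < (subs.length : Int) := by omega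
          have h2 : index - (current.length : Int) + ipt < (subs.length : Int) := by omega
          conv_lhs => rw [pvBLoop_succ]
          rw [if_pos h1, if_pos h2, pvBLoop_acc]
          congr 1
          · rw [show (index - (current.length : Int)) + ipt = index from by omega, ← hrep]
            simp
          · exact pvBLoop_fuel subs ipt (ipt - cover) hstep _ _ _ (by omega) (by omega)
        rw [hStep]
        simp
    · -- exit
      rw [if_neg hlt]
      rcases eq_or_ne current [] with hc | hc
      · subst hc
        simp only [List.length_nil, Nat.cast_zero, sub_zero] at *
        have hB : pvBLoop subs ipt (ipt - cover) (subs.length + 1) index [] = [] := by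
          simp only [pvBLoop]
          rw [if_neg hlt]
        rw [hB]
        simp
      · have hil : index ≤ (subs.length : Int) := hne hc
        have hclpos : 0 < current.length := List.length_pos_iff.mpr hc
        rw [if_pos (by omega)]
        have hB : pvBLoop subs ipt (ipt - cover) (subs.length + 1) (index - (current.length : Int)) []
            = [current] := by
          simp only [pvBLoop]
          split_ifs with h1 h2
          · exact absurd h2 (by omega)
          · rw [pvSliceClamp subs _ _ (by omega) (by omega), hrep,
                pvSliceClamp subs _ _ (by omega) (by omega)]
            simp
            omega
          · exact absurd (by omega) h1
        rw [hB]

lemma pvFill (subs : List String) (ipt cover : Int) :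
    ∀ (n : Nat) (feed : List (List String)) (current : List String) (index : Int),
      0 ≤ index → index ≤ (subs.length : Int) →
      (current.length : Int) + ((subs.length : Int) - index) ≤ ipt →
      ((subs.length : Int) - index).toNat < n →
      pvALoop subs ipt cover n feed current index =
        if (current ++ subs.drop index.toNat).length > 0 then feed ++ [current ++ subs.drop index.toNat] else feed := by
  intro n
  induction n with
  | zero => intro feed current index h0 h1 h2 h3; omega
  | succ n ih =>
    intro feed current index h0 h1 h2 h3
    simp only [pvALoop]
    by_cases hlt : index < (subs.length : Int)
    · rw [if_pos hlt]
      have hpos : (current.length : Int) < ipt := by omega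
      rw [if_pos hpos]
      rw [PySem.List.pyGet?_eq_some_getElem subs h0 hlt]
      simp only []
      show pvALoop subs ipt cover n feed (current ++ [subs[index.toNat]]) (index + 1) = _
      rw [ih feed (current ++ [subs[index.toNat]]) (index + 1) (by omega) (by omega)
          (by simp; omega) (by omega)]
      have hd : subs.drop index.toNat = subs[index.toNat] :: subs.drop (index.toNat + 1) :=
        List.drop_eq_getElem_cons (by omega)
      have h4 : (index + 1).toNat = index.toNat + 1 := by omega
      rw [h4, hd]
      simp
    · rw [if_neg hlt]
      rw [show subs.drop index.toNat = [] from List.drop_of_length_le (by omega)]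
      simp

-- ===== VERDICT (by name: the statement is the Claim_ definition above) =====
theorem make_cover_feed_list_spec : Claim_equal_make_cover_feed_list := by
  intro subs ipt cover _hdom hpre
  unfold Spec_make_cover_feed_list make_cover_feed_list make_cover_feed_list_alt
  rcases eq_or_ne subs ([] : List String) with hnil | hnil
  · subst hnil
    simp [pvALoop, pvBLoop]
  · have hpre' : 1 ≤ ipt ∧ (cover < ipt ∨ (subs.length : Int) ≤ ipt) := by
      rcases hpre with h | h
      · exact absurd h hnil
      · exact h
    obtain ⟨hipt, hcase⟩ := hpre'
    by_cases hstep : 1 ≤ ipt - cover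
    · have hlist := pvMain subs ipt cover hipt hstep ((ipt.toNat + 1) * (subs.length + 1) + 1)
        [] [] 0 (by simp) (by simp; omega) (fun h => absurd rfl h)
        (by simp only [List.length_nil, Nat.cast_zero, sub_zero]
            exact (pvSliceNil subs 0 le_rfl).symm)
        (by simp only [List.length_nil, Nat.cast_zero, sub_zero, Int.toNat_natCast]
            have he : (ipt.toNat + 1) * (subs.length + 1)
                = (ipt.toNat + 1) * subs.length + (ipt.toNat + 1) := by ring
            omega)
      simp only [List.length_nil, Nat.cast_zero, sub_zero, List.nil_append] at hlist
      rw [hlist]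
      rfl
    · have hlen : (subs.length : Int) ≤ ipt := by
        rcases hcase with h | h
        · omega
        · exact h
      rw [pvFill subs ipt cover _ [] [] 0 le_rfl (by omega) (by simp; omega)
          (by have := Nat.le_mul_of_pos_left (subs.length + 1) (show 0 < ipt.toNat + 1 by omega)
              omega)]
      have hBv : pvBLoop subs ipt (ipt - cover) (subs.length + 1) 0 [] = [subs] := by
        rw [pvBLoop_succ]
        rw [if_pos (by simp; exact List.length_pos_iff.mpr hnil)]
        rw [if_neg (by omega)]
        rw [show (0 : Int) + ipt = ipt from by ring,
            pvSliceClamp subs 0 ipt le_rfl hlen]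
        simp
      rw [hBv]
      simp [List.length_pos_iff.mpr hnil]
      rfl
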